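-- pv_equiv track=rewrite | github.com/narennravi/Guvi-Codekata-ARRAYS | 109.py | max_increasing_subarray_sum
-- ===== SOURCE A (Python) =====
-- def max_increasing_subarray_sum(n, arr):
--     if n == 0:
--         return 0
--
--     dp = [0] * n
--     dp[0] = arr[0]
--     max_sum = dp[0]
--
--     for i in range(1, n):
--         if arr[i] > arr[i - 1]:
--             dp[i] = dp[i - 1] + arr[i]
--         else:
--             dp[i] = arr[i]
--
--         max_sum = max(max_sum, dp[i])
--
--     return max_sum
-- ===== SOURCE B (Python) =====
-- def max_increasing_subarray_sum(n, arr):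
--     if n == 0:
--         return 0
--     # phase 1: split arr[:n] into maximal strictly increasing runs
--     runs = []
--     cur = [arr[0]]
--     for x in arr[1:n]:
--         if x > cur[-1]:
--             cur.append(x)
--         else:
--             runs.append(cur)
--             cur = [x]
--     runs.append(cur)
--     # phase 2: best prefix sum of each run, then the global maximum
--     return max(max_prefix_sum(r) for r in runs)
--
--
-- def max_prefix_sum(run):
--     s = run[0]
--     best = run[0]
--     for x in run[1:]:
--         s += x
--         best = max(best, s)
--     return best
-- ===== Notes on version B (the rewrite author's own statement) =====
-- stated objective: alternative
-- what changed: A fuses everything into one dp-array loop; B is a two-phase decomposition: it first splits arr[:n] into maximal strictly increasing runs, then reduces each run to its best prefix sum and returns the global maximum, with no dp array.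
import Mathlib
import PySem

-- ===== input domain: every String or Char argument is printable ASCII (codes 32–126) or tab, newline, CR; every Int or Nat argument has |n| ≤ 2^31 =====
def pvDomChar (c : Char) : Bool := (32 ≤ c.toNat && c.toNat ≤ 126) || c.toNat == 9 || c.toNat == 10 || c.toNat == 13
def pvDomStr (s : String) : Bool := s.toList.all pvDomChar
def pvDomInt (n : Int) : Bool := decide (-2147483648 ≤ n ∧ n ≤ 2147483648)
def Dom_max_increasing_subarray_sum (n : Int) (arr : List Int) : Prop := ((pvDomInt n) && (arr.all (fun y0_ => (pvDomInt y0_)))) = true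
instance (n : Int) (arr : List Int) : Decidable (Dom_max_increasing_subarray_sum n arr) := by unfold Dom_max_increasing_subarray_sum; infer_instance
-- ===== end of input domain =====

-- B re-implements A in two phases (split arr[:n] into maximal strictly increasing runs,
-- then take the best prefix sum per run and the global max); objective: alternative decomposition, not speed.

-- ===== PORT A =====
-- loop body of A's 'for i in range(1, n)'
def aStep (arr : List Int) (st : List Int × Int) (i : Int) : List Int × Int :=
  let ai := PySem.List.pyGetD arr i 0
  let dpi := if ai > PySem.List.pyGetD arr (i - 1) 0
             then PySem.List.pyGetD st.1 (i - 1) 0 + ai else ai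
  (PySem.List.pySetD st.1 i dpi, max st.2 dpi)

def max_increasing_subarray_sum (n : Int) (arr : List Int) : Int :=
  if n = 0 then 0
  else
    let dp0 : List Int := List.replicate n.toNat 0
    let dp1 := PySem.List.pySetD dp0 0 (PySem.List.pyGetD arr 0 0)
    let maxSum := PySem.List.pyGetD dp1 0 0
    ((PySem.List.pyRange 1 n 1).foldl (aStep arr) (dp1, maxSum)).2

-- ===== PORT B =====
-- loop body of max_prefix_sum's 'for x in run[1:]'
def mgo (sb : Int × Int) (y : Int) : Int × Int := (sb.1 + y, max sb.2 (sb.1 + y))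

def max_prefix_sum (run : List Int) : Int :=
  let s := PySem.List.pyGetD run 0 0
  ((PySem.List.slice run (some 1) none).foldl mgo (s, s)).2

-- loop body of B's 'for x in arr[1:n]'
def bStep (st : List (List Int) × List Int) (x : Int) : List (List Int) × List Int :=
  if x > PySem.List.pyGetD st.2 (-1) 0 then (st.1, st.2 ++ [x])
  else (st.1 ++ [st.2], [x])

-- Python's max(...) over a nonempty sequence of ints
def phi : List Int → Int
  | [] => 0
  | v :: vs => vs.foldl max v

def max_increasing_subarray_sum_alt (n : Int) (arr : List Int) : Int :=
  if n = 0 then 0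
  else
    let st := (PySem.List.slice arr (some 1) (some n)).foldl bStep
                ([], [PySem.List.pyGetD arr 0 0])
    phi ((st.1 ++ [st.2]).map max_prefix_sum)

-- ===== PRECONDITION & SPEC =====
-- A raises IndexError when n ≠ 0 fails 1 ≤ n ≤ len(arr) (dp[0] on an empty dp, or arr[i] past the end).
def Pre_max_increasing_subarray_sum (n : Int) (arr : List Int) : Prop :=
  n = 0 ∨ (1 ≤ n ∧ n ≤ arr.length)
instance (n : Int) (arr : List Int) : Decidable (Pre_max_increasing_subarray_sum n arr) := by
  unfold Pre_max_increasing_subarray_sum; infer_instance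

def pvWitness_max_increasing_subarray_sum : Int × List Int := (3, [1, 2, 3])

def Spec_max_increasing_subarray_sum (n : Int) (arr : List Int) (out : Int) : Prop :=
  out = max_increasing_subarray_sum_alt n arr
instance (n : Int) (arr : List Int) (out : Int) : Decidable (Spec_max_increasing_subarray_sum n arr out) := by
  unfold Spec_max_increasing_subarray_sum; infer_instance

-- ===== CLAIM (what is proved, stated in full; the proofs are below) =====
def Claim_equal_max_increasing_subarray_sum : Prop :=
  ∀ (n : Int) (arr : List Int), Dom_max_increasing_subarray_sum n arr →
    Pre_max_increasing_subarray_sum n arr →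
    Spec_max_increasing_subarray_sum n arr (max_increasing_subarray_sum n arr)

-- ===== LEMMAS AND PROOFS =====

-- reference recursion: the fused loop over indices j+1 .. j+k (d = current dp value, m = running max)
def sgo (arr : List Int) : Nat → Nat → Int → Int → Int
  | _, 0, _, m => m
  | j, k+1, d, m =>
      let ai := arr.getD (j+1) 0
      let d' := if ai > arr.getD j 0 then d + ai else ai
      sgo arr (j+1) k d' (max m d')

-- same fused loop over the list of remaining elements
def fgoL : List Int → Int → Int → Int → Int
  | [], _, _, m => m
  | y :: ys, prev, d, m =>
      let d' := if y > prev then d + y else y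
      fgoL ys y d' (max m d')

theorem foldl_max_out (l : List Int) (a b : Int) :
    List.foldl max (max a b) l = max (List.foldl max a l) b := by
  induction l generalizing a with
  | nil => simp
  | cons c l ih =>
      simp only [List.foldl]
      rw [show max (max a b) c = max (max a c) b by
        rw [max_assoc, max_comm b c, ← max_assoc], ih]

theorem phi_append (l : List Int) (b : Int) : phi (l ++ [b]) = List.foldl max b l := by
  cases l with
  | nil => simp [phi]
  | cons a l =>
      simp only [List.cons_append, phi, List.foldl_append, List.foldl]
      rw [← foldl_max_out, max_comm b a]

theorem mfst (xs : List Int) (s b : Int) : (xs.foldl mgo (s, b)).1 = s + xs.sum := by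
  induction xs generalizing s b with
  | nil => simp
  | cons y ys ih => simp only [List.foldl, mgo, List.sum_cons]; rw [ih]; ring

theorem mps_cons (x : Int) (xs : List Int) :
    max_prefix_sum (x :: xs) = (xs.foldl mgo (x, x)).2 := by
  simp [max_prefix_sum, PySem.List.pyGetD_zero_cons, PySem.List.slice_from_one]

theorem mps_append (l : List Int) (hl : l ≠ []) (y : Int) :
    max_prefix_sum (l ++ [y]) = max (max_prefix_sum l) (l.sum + y) := by
  obtain ⟨x, xs, rfl⟩ := List.exists_cons_of_ne_nil hl
  rw [List.cons_append, mps_cons, mps_cons, List.foldl_append]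
  simp only [List.foldl, mgo, mfst, List.sum_cons]

theorem mps_singleton (y : Int) : max_prefix_sum [y] = y := by
  rw [show [y] = y :: ([] : List Int) from rfl, mps_cons]; simp

theorem B_inv (t : List Int) : ∀ (runs : List (List Int)) (cur : List Int) (x : Int),
    phi (((t.foldl bStep (runs, cur ++ [x])).1 ++ [(t.foldl bStep (runs, cur ++ [x])).2]).map max_prefix_sum)
      = fgoL t x ((cur ++ [x]).sum)
          (List.foldl max (max_prefix_sum (cur ++ [x])) (runs.map max_prefix_sum)) := by
  induction t with
  | nil =>
      intro runs cur x
      simp only [List.foldl, fgoL, List.map_append, List.map_cons, List.map_nil]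
      rw [phi_append]
  | cons y t ih =>
      intro runs cur x
      simp only [List.foldl, bStep, PySem.List.pyGetD_neg_one_append_singleton, fgoL]
      by_cases hy : y > x
      · rw [if_pos hy, if_pos hy]
        have := ih runs (cur ++ [x]) y
        rw [this, mps_append (cur ++ [x]) (by simp) y, foldl_max_out]
        simp [add_assoc]
      · rw [if_neg hy, if_neg hy]
        have := ih (runs ++ [cur ++ [x]]) [] y
        simp only [List.nil_append] at this
        rw [this, mps_singleton, List.map_append, List.map_cons, List.map_nil,
            List.foldl_append]
        simp only [List.foldl]
        rw [← foldl_max_out, ← foldl_max_out, max_comm y (max_prefix_sum (cur ++ [x]))]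
        simp

theorem fgoL_eq_sgo (arr : List Int) : ∀ (k j : Nat) (d m : Int), j + 1 + k ≤ arr.length →
    fgoL ((arr.drop (j+1)).take k) (arr.getD j 0) d m = sgo arr j k d m := by
  intro k
  induction k with
  | zero => intro j d m _; simp [fgoL, sgo]
  | succ k ih =>
      intro j d m h
      have hj1 : j + 1 < arr.length := by omega
      rw [List.drop_eq_getElem_cons hj1, List.take_succ_cons]
      simp only [fgoL, sgo]
      rw [show arr.getD (j+1) 0 = arr[j+1] from List.getD_eq_getElem arr 0 hj1]
      have := ih (j+1) (if arr[j+1] > arr.getD j 0 then d + arr[j+1] else arr[j+1])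
        (max m (if arr[j+1] > arr.getD j 0 then d + arr[j+1] else arr[j+1])) (by omega)
      rw [show arr.getD (j+1) 0 = arr[j+1] from List.getD_eq_getElem arr 0 hj1] at this
      exact this

theorem A_loop (arr : List Int) (n : Int) :
    ∀ (k j : Nat) (dp : List Int) (d m : Int),
    dp.length = n.toNat → ((j : Int) + 1) + k = n → dp.getD j 0 = d →
    ((PySem.List.pyRange (1 + (j : Int)) n 1).foldl (aStep arr) (dp, m)).2
      = sgo arr j k d m := by
  intro k
  induction k with
  | zero =>
      intro j dp d m _ hjn _
      rw [PySem.List.pyRange_one_eq_nil (by omega)]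
      simp [sgo]
  | succ k ih =>
      intro j dp d m hlen hjn hd
      rw [PySem.List.pyRange_one_cons (by omega)]
      simp only [List.foldl]
      have e1 : (1 : Int) + (j : Int) = ((j + 1 : Nat) : Int) := by push_cast; ring
      have e2 : ((j + 1 : Nat) : Int) - 1 = ((j : Nat) : Int) := by push_cast; ring
      have hjlt : j + 1 < dp.length := by omega
      simp only [aStep, e1]
      simp only [e2, PySem.List.pyGetD_natCast, hd]
      rw [show ((j+1:Nat):Int) + 1 = 1 + ((j+1:Nat):Int) by ring]
      rw [ih (j+1)
        (PySem.List.pySetD dp ((j+1:Nat):Int)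
          (if arr.getD (j+1) 0 > arr.getD j 0 then d + arr.getD (j+1) 0 else arr.getD (j+1) 0))
        (if arr.getD (j+1) 0 > arr.getD j 0 then d + arr.getD (j+1) 0 else arr.getD (j+1) 0)
        _
        (by rw [PySem.List.length_pySetD]; exact hlen)
        (by push_cast at hjn ⊢; omega)
        (by
          have h3 := PySem.List.pyGetD_pySetD_natCast dp (j+1) (j+1)
            (if arr.getD (j+1) 0 > arr.getD j 0 then d + arr.getD (j+1) 0 else arr.getD (j+1) 0) 0 hjlt
          simp only [PySem.List.pyGetD_natCast] at h3
          simpa using h3)]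
      simp only [sgo]

-- ===== VERDICT (by name: the statement is the Claim_ definition above) =====
theorem max_increasing_subarray_sum_spec : Claim_equal_max_increasing_subarray_sum := by
  intro n arr _ hpre
  unfold Spec_max_increasing_subarray_sum
  rcases hpre with h0 | ⟨h1, h2⟩
  · subst h0; simp [max_increasing_subarray_sum, max_increasing_subarray_sum_alt]
  · have hn0 : n ≠ 0 := by omega
    have hN : 1 ≤ n.toNat := by omega
    have ha0 : PySem.List.pyGetD arr 0 0 = arr.getD 0 0 := by
      simpa using PySem.List.pyGetD_natCast arr 0 0
    -- A side
    have hA : max_increasing_subarray_sum n arr = sgo arr 0 (n.toNat - 1) (arr.getD 0 0) (arr.getD 0 0) := by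
      simp only [max_increasing_subarray_sum, if_neg hn0]
      rw [ha0]
      have hm : PySem.List.pyGetD (PySem.List.pySetD (List.replicate n.toNat (0:Int)) 0 (arr.getD 0 0)) 0 0
          = arr.getD 0 0 := by
        have h3 := PySem.List.pyGetD_pySetD_natCast (List.replicate n.toNat (0:Int)) 0 0
          (arr.getD 0 0) 0 (by rw [List.length_replicate]; omega)
        simpa using h3
      have hd2 : (PySem.List.pySetD (List.replicate n.toNat (0:Int)) 0 (arr.getD 0 0)).getD 0 0
          = arr.getD 0 0 := by
        have h' := PySem.List.pyGetD_natCast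
          (PySem.List.pySetD (List.replicate n.toNat (0:Int)) 0 (arr.getD 0 0)) 0 (0:Int)
        simp only [Nat.cast_zero] at h'
        rw [← h', hm]
      have hloop := A_loop arr n (n.toNat - 1) 0
        (PySem.List.pySetD (List.replicate n.toNat (0:Int)) 0 (arr.getD 0 0))
        (arr.getD 0 0) (arr.getD 0 0)
        (by rw [PySem.List.length_pySetD, List.length_replicate])
        (by push_cast; omega) hd2
      simp only [Nat.cast_zero, add_zero] at hloop
      rw [hm, hloop]
    -- B side
    have hB : max_increasing_subarray_sum_alt n arr = sgo arr 0 (n.toNat - 1) (arr.getD 0 0) (arr.getD 0 0) := by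
      simp only [max_increasing_subarray_sum_alt, if_neg hn0]
      rw [PySem.List.slice_toNat arr (by omega) (by omega)]
      have hInv := B_inv (((arr.drop (1:Int).toNat).take (n.toNat - (1:Int).toNat))) [] [] (PySem.List.pyGetD arr 0 0)
      simp only [List.nil_append, List.map_nil, List.foldl_nil, List.sum_cons, List.sum_nil,
        add_zero, mps_singleton] at hInv
      rw [hInv, ha0]
      have : (1:Int).toNat = 1 := rfl
      rw [this]
      exact fgoL_eq_sgo arr (n.toNat - 1) 0 _ _ (by omega)
    rw [hA, hB]
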